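-- pv_equiv track=rewrite | github.com/enahern/Text-Similarity-Detection | DetectSimilarParagraphs.py | bit_vector
-- ===== SOURCE A (Python) =====
-- def find_max(lst):
--     maxlst = []
--     for i in lst:
--         maxlst += [max(i)]
--     return max(maxlst)
--
-- def bit_vector(num_lst):
--     vec = []
--     for para in num_lst:
--         v1 = []
--         for i in range(1, find_max(num_lst)+1):
--             if i in para:
--                 v1.append(1)
--             else:
--                 v1.append(0)
--         vec.append(v1)
--     return vec
-- ===== SOURCE B (Python) =====
-- def bit_vector(num_lst):
--     # Scatter version: compute the global max once, then mark positions directly.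
--     if not num_lst:
--         return []
--     maxval = max(max(para) for para in num_lst)
--     result = []
--     for para in num_lst:
--         v = [0] * maxval
--         for x in para:
--             if 1 <= x <= maxval:
--                 v[x - 1] = 1
--         result.append(v)
--     return result
-- ===== Notes on version B (the rewrite author's own statement) =====
-- stated objective: faster
-- what changed: B computes the global maximum once and scatters each paragraph's values into a preallocated zero vector, instead of recomputing find_max for every paragraph and testing membership of every candidate index in the paragraph.
import Mathlib
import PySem

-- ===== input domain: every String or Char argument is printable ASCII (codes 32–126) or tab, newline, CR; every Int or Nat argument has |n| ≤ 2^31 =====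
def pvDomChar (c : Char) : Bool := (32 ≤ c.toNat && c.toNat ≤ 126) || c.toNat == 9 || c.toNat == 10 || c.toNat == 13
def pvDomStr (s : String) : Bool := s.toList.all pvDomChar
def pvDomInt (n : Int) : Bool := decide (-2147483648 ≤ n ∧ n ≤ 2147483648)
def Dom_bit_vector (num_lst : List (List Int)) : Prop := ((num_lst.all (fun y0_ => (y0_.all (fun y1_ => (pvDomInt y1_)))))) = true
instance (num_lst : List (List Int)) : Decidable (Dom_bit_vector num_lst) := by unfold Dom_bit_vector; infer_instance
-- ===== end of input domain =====

-- B computes the global maximum once and scatters each paragraph's values into a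
-- preallocated zero vector, instead of recomputing find_max per paragraph and
-- testing membership of every candidate index (objective: faster).

-- ===== PORT A =====
-- find_max: builds the list of per-paragraph maxima, then takes its max.
-- max(i) on an empty list raises in Python (max? = none); such inputs are outside Pre_.
def pvFindMax (lst : List (List Int)) : Int :=
  let maxlst := lst.foldl (fun acc i => acc ++ [(PySem.List.max? i (fun y => y)).getD 0]) []
  (PySem.List.max? maxlst (fun y => y)).getD 0

def bit_vector (num_lst : List (List Int)) : List (List Int) :=
  num_lst.foldl (fun vec para =>
    vec ++ [(PySem.List.pyRange 1 (pvFindMax num_lst + 1) 1).foldl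
      (fun v1 i => v1 ++ [if i ∈ para then (1 : Int) else 0]) []]) []

-- ===== PORT B =====
def bit_vector_alt (num_lst : List (List Int)) : List (List Int) :=
  if num_lst = [] then []
  else
    -- max(max(para) for para in num_lst); max? = none is Python's ValueError, outside Pre_
    let maxval := (PySem.List.max? (num_lst.map (fun para =>
      (PySem.List.max? para (fun y => y)).getD 0)) (fun y => y)).getD 0
    num_lst.foldl (fun result para =>
      result ++ [para.foldl (fun v x =>
          if 1 ≤ x ∧ x ≤ maxval then v.set (x - 1).toNat 1 else v)
        (PySem.List.pyRepeat [0] maxval)]) []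

-- ===== PRECONDITION & SPEC =====
-- Pre_ excludes non-empty inputs containing an empty paragraph: there Python A raises
-- ValueError (max() of an empty sequence).
def Pre_bit_vector (num_lst : List (List Int)) : Prop := ∀ para ∈ num_lst, para ≠ []
instance (num_lst : List (List Int)) : Decidable (Pre_bit_vector num_lst) := by unfold Pre_bit_vector; infer_instance
def pvWitness_bit_vector : List (List Int) := [[1, 2], [2]]

def Spec_bit_vector (num_lst : List (List Int)) (out : List (List Int)) : Prop := out = bit_vector_alt num_lst
instance (num_lst : List (List Int)) (out : List (List Int)) : Decidable (Spec_bit_vector num_lst out) := by unfold Spec_bit_vector; infer_instance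

-- ===== CLAIM (what is proved, stated in full; the proofs are below) =====
def Claim_equal_bit_vector : Prop := ∀ (num_lst : List (List Int)), Dom_bit_vector num_lst → Pre_bit_vector num_lst → Spec_bit_vector num_lst (bit_vector num_lst)

-- ===== LEMMAS AND PROOFS =====

-- the scatter loop body of B
def pvScatter (M : Int) (para v0 : List Int) : List Int :=
  para.foldl (fun v x => if 1 ≤ x ∧ x ≤ M then v.set (x - 1).toNat 1 else v) v0

theorem pvScatter_length (M : Int) (para v0 : List Int) :
    (pvScatter M para v0).length = v0.length := by
  induction para generalizing v0 with
  | nil => rfl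
  | cons x t ih =>
      simp only [pvScatter, List.foldl_cons] at *
      rw [ih]
      split <;> simp

theorem pvScatter_getD (M : Int) (para : List Int) : ∀ (v0 : List Int),
    v0.length = M.toNat → ∀ (j : Nat), j < v0.length →
    (pvScatter M para v0).getD j 0 = (if ((j : Int) + 1) ∈ para then 1 else v0.getD j 0) := by
  induction para with
  | nil => intro v0 _ j hj; simp [pvScatter]
  | cons x t ih =>
      intro v0 hlen j hj
      have hstep : pvScatter M (x :: t) v0
          = pvScatter M t (if 1 ≤ x ∧ x ≤ M then v0.set (x - 1).toNat 1 else v0) := rfl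
      rw [hstep]
      have hlen' : (if 1 ≤ x ∧ x ≤ M then v0.set (x - 1).toNat 1 else v0).length = M.toNat := by
        split <;> simp [hlen]
      have hj' : j < (if 1 ≤ x ∧ x ≤ M then v0.set (x - 1).toNat 1 else v0).length := by
        rw [hlen']; omega
      rw [ih _ hlen' j hj']
      by_cases hmem : ((j : Int) + 1) ∈ t
      · simp [hmem]
      · rw [if_neg hmem]
        by_cases hx : x = (j : Int) + 1
        · have hrange : 1 ≤ x ∧ x ≤ M := by
            subst hx; constructor
            · omega
            · omega
          rw [if_pos hrange]
          have hidx : (x - 1).toNat = j := by omega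
          have hmem2 : ((j : Int) + 1) ∈ x :: t := by simp [hx]
          rw [if_pos hmem2, hidx]
          simp [List.getD_eq_getElem?_getD, hj]
        · have hmem2 : ¬ ((j : Int) + 1) ∈ x :: t := by
            simp only [List.mem_cons, hmem, or_false]
            exact fun h => hx h.symm
          rw [if_neg hmem2]
          split
          · next hr =>
              simp only [List.getD_eq_getElem?_getD]
              rw [List.getElem?_set_ne (by omega : (x - 1).toNat ≠ j)]
          · rfl

-- foldl append-singleton loops are maps
theorem pvFoldlAppend {α β : Type} (f : α → β) (l : List α) (acc : List β) :
    l.foldl (fun acc x => acc ++ [f x]) acc = acc ++ l.map f := by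
  induction l generalizing acc with
  | nil => simp
  | cons x t ih => simp [ih]

-- the per-paragraph gather vector of A, as a map over the range
def pvGather (M : Int) (para : List Int) : List Int :=
  (PySem.List.pyRange 1 (M + 1) 1).map (fun i => if i ∈ para then 1 else 0)

theorem pvGather_eq_scatter (M : Int) (para : List Int) :
    pvGather M para = pvScatter M para (PySem.List.pyRepeat [0] M) := by
  have hrep : PySem.List.pyRepeat [(0 : Int)] M = List.replicate M.toNat 0 :=
    PySem.List.pyRepeat_singleton 0 M
  rw [hrep]
  have hlen0 : (List.replicate M.toNat (0 : Int)).length = M.toNat := by simp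
  apply List.ext_getElem
  · simp [pvGather, pvScatter_length, PySem.List.length_pyRange_one]
  · intro j hj1 hj2
    have hjM : j < M.toNat := by
      simpa [pvGather, PySem.List.length_pyRange_one] using hj1
    have hget := pvScatter_getD M para (List.replicate M.toNat 0) hlen0 j (by simpa using hjM)
    have h1 : (pvScatter M para (List.replicate M.toNat 0))[j] =
        (pvScatter M para (List.replicate M.toNat 0)).getD j 0 := by
      rw [List.getD_eq_getElem?_getD, List.getElem?_eq_getElem hj2]; rfl
    rw [h1, hget]
    have h2 : (pvGather M para)[j] = if ((1 : Int) + j) ∈ para then 1 else 0 := by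
      simp [pvGather, PySem.List.getElem_pyRange_one]
    rw [h2]
    have h3 : (1 : Int) + j = (j : Int) + 1 := by ring
    simp [h3, hjM]

-- A's find_max (recomputed per paragraph) is B's once-computed maxval
theorem pvFindMax_eq (num_lst : List (List Int)) :
    pvFindMax num_lst
      = (PySem.List.max? (num_lst.map (fun para =>
          (PySem.List.max? para (fun y => y)).getD 0)) (fun y => y)).getD 0 := by
  unfold pvFindMax
  rw [pvFoldlAppend, List.nil_append]

-- the ports agree on all inputs; Pre_ marks where the PYTHON A raises (ValueError)
theorem bit_vector_eq (num_lst : List (List Int)) :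
    bit_vector num_lst = bit_vector_alt num_lst := by
  unfold bit_vector bit_vector_alt
  cases num_lst with
  | nil => rfl
  | cons p ps =>
      rw [if_neg (by simp)]
      simp only [pvFoldlAppend, List.nil_append]
      apply List.map_congr_left
      intro para _
      show pvGather (pvFindMax (p :: ps)) para = pvScatter _ para _
      rw [pvFindMax_eq]
      exact pvGather_eq_scatter _ para

-- ===== VERDICT (by name: the statement is the Claim_ definition above) =====
theorem bit_vector_spec : Claim_equal_bit_vector := by
  intro num_lst _ _
  exact bit_vector_eq num_lst
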